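-- pv_equiv track=rewrite | github.com/ElmouhiYassine/Adder | Adders/balanced_ternary_adder.py | BT_add
-- ===== SOURCE A (Python) =====
-- def BT_add(A, B):
--
--     n = max(len(A), len(B))
--     carry = 0
--     result = []
--
--     for i in range(n):
--         a = A[i] if i < len(A) else 0
--         b = B[i] if i < len(B) else 0
--
--         total = a + b + carry
--
--         carry = (total + 1) // 3
--         digit = total - 3 * carry
--
--         result.append(digit)
--
--     if carry != 0:
--         result.append(carry)
--
--     return result
-- ===== SOURCE B (Python) =====
-- def BT_add(A, B):
--     # Horner-evaluate both digit arrays to one integer, then extract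
--     # max(len(A), len(B)) balanced-ternary digits and append the leftover carry.
--     V = 0
--     for d in reversed(A):
--         V = 3 * V + d
--     W = 0
--     for d in reversed(B):
--         W = 3 * W + d
--     V += W
--     result = []
--     for _ in range(max(len(A), len(B))):
--         c = (V + 1) // 3
--         result.append(V - 3 * c)
--         V = c
--     if V != 0:
--         result.append(V)
--     return result
-- ===== Notes on version B (the rewrite author's own statement) =====
-- stated objective: alternative
-- what changed: Instead of the per-position digit loop with a running carry over both arrays, B Horner-evaluates both arrays to a single integer and then peels off max(len(A),len(B)) balanced-ternary digits plus the leftover carry.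
import Mathlib
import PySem

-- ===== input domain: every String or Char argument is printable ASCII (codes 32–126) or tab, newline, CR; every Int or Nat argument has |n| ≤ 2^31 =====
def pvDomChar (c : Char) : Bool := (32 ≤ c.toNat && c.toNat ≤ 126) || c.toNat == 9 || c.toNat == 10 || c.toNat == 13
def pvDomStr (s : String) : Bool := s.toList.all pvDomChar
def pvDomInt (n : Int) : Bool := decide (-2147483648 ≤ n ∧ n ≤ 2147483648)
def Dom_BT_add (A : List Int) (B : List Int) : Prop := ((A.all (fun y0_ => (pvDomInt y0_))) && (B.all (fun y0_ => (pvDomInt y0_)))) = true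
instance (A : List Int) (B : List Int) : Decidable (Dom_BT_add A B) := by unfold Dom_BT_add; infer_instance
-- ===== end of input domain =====

-- B replaces A's per-position add-with-carry loop by Horner evaluation of both arrays to one
-- integer followed by balanced-ternary digit extraction (alternative decomposition, not faster: big-integer arithmetic).


-- ===== PORT A =====
-- A's index loop pads the shorter list with 0s; recursion on both lists with 0-defaulted heads
-- is the obvious structural form of the same iteration (same per-step values and state).
def btAddLoop : Int → List Int → List Int → List Int
  | carry, [], [] => if carry ≠ 0 then [carry] else []
  | carry, a :: A', [] =>
    let total := a + 0 + carry
    let c := PySem.Int.floordiv (total + 1) 3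
    (total - 3 * c) :: btAddLoop c A' []
  | carry, [], b :: B' =>
    let total := 0 + b + carry
    let c := PySem.Int.floordiv (total + 1) 3
    (total - 3 * c) :: btAddLoop c [] B'
  | carry, a :: A', b :: B' =>
    let total := a + b + carry
    let c := PySem.Int.floordiv (total + 1) 3
    (total - 3 * c) :: btAddLoop c A' B'

def BT_add (A : List Int) (B : List Int) : List Int := btAddLoop 0 A B

-- ===== PORT B =====
-- V = 0; for d in reversed(L): V = 3*V + d
def btHorner : List Int → Int
  | [] => 0
  | d :: t => 3 * btHorner t + d

-- the digit-extraction loop (fuel = max(len A, len B)), then the leftover carry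
def btExtract : Int → Nat → List Int
  | v, 0 => if v ≠ 0 then [v] else []
  | v, k + 1 =>
    let c := PySem.Int.floordiv (v + 1) 3
    (v - 3 * c) :: btExtract c k

def BT_add_alt (A : List Int) (B : List Int) : List Int :=
  btExtract (btHorner A + btHorner B) (max A.length B.length)

-- ===== PRECONDITION & SPEC =====
def Spec_BT_add (A : List Int) (B : List Int) (out : List Int) : Prop := out = BT_add_alt A B
instance (A : List Int) (B : List Int) (out : List Int) : Decidable (Spec_BT_add A B out) := by unfold Spec_BT_add; infer_instance

-- ===== CLAIM (what is proved, stated in full; the proofs are below) =====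
def Claim_equal_BT_add : Prop := ∀ (A : List Int) (B : List Int), Dom_BT_add A B → Spec_BT_add A B (BT_add A B)

-- ===== LEMMAS AND PROOFS =====

-- shifting the remaining value by 3*r shifts the carry by r and keeps the digit
theorem bt_fdiv_shift (t r : Int) :
    PySem.Int.floordiv (t + 3 * r + 1) 3 = PySem.Int.floordiv (t + 1) 3 + r := by
  have h3 : (3 : Int) ≠ 0 := by norm_num
  have : t + 3 * r + 1 = (t + 1) + r * 3 := by ring
  rw [this]
  simp [PySem.Int.floordiv, Int.add_mul_fdiv_right _ _ h3]

theorem btAddLoop_nil (B : List Int) (carry : Int) :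
    btAddLoop carry [] B = btExtract (carry + btHorner B) B.length := by
  induction B generalizing carry with
  | nil => simp [btAddLoop, btExtract, btHorner]
  | cons b B' ih =>
    simp only [btAddLoop, btHorner, List.length_cons]
    have ht : carry + (3 * btHorner B' + b) = (0 + b + carry) + 3 * btHorner B' := by ring
    rw [ht, btExtract, bt_fdiv_shift]
    refine congrArg₂ List.cons (by ring) ?_
    rw [ih]

theorem btAddLoop_eq (A B : List Int) (carry : Int) :
    btAddLoop carry A B = btExtract (carry + btHorner A + btHorner B) (max A.length B.length) := by
  induction A generalizing B carry with
  | nil => simpa [btHorner] using btAddLoop_nil B carry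
  | cons a A' ih =>
    cases B with
    | nil =>
      simp only [btAddLoop, btHorner, List.length_cons, List.length_nil, Nat.max_zero]
      have ht : carry + (3 * btHorner A' + a) + 0 = (a + 0 + carry) + 3 * btHorner A' := by ring
      rw [ht, btExtract, bt_fdiv_shift]
      refine congrArg₂ List.cons (by ring) ?_
      rw [ih]; simp [btHorner]
    | cons b B' =>
      simp only [btAddLoop, btHorner, List.length_cons, Nat.succ_max_succ]
      have ht : carry + (3 * btHorner A' + a) + (3 * btHorner B' + b) =
          (a + b + carry) + 3 * (btHorner A' + btHorner B') := by ring
      rw [ht, btExtract, bt_fdiv_shift]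
      refine congrArg₂ List.cons (by ring) ?_
      rw [ih]; congr 1; ring

-- ===== VERDICT (by name: the statement is the Claim_ definition above) =====
theorem BT_add_spec : Claim_equal_BT_add := by
  intro A B _
  show BT_add A B = BT_add_alt A B
  unfold BT_add BT_add_alt
  simpa using btAddLoop_eq A B 0
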